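-- pv_equiv track=rewrite | github.com/adityashrikhande/DSA-codes | Trees/Trie/hotel reviews.py | solve
-- ===== SOURCE A (Python) =====
-- class Node:
--     def __init__(self, char=None):
--         self.char = char
--         self.neighbours = {}
--         self.is_word = False
--
-- def solve(A, B):
--     trie_root = Node()
--
--     for word in A.split('_'):
--         curr_tree_pos = trie_root
--         for char in word:
--             if char not in curr_tree_pos.neighbours:
--                 curr_tree_pos.neighbours[char] = Node(char)
--
--             curr_tree_pos = curr_tree_pos.neighbours[char]
--         curr_tree_pos.is_word = True
--
--     reviews_goodness = []
--     for i, review in enumerate(B):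
--         goodness_score = 0
--         for word in review.split('_'):
--             curr_tree_pos = trie_root
--             legal_candidate = True
--             for char in word:
--                 if char not in curr_tree_pos.neighbours:
--                     legal_candidate = False
--                     break
--
--                 curr_tree_pos = curr_tree_pos.neighbours[char]
--
--             if legal_candidate and curr_tree_pos.is_word:
--                 goodness_score += 1
--
--         reviews_goodness.append((goodness_score, i))
--
--     reviews_goodness.sort(key = lambda t: (t[0], len(reviews_goodness) - t[1]), reverse=True) # imp comparator
--
--     return [t[1] for t in reviews_goodness]
-- ===== SOURCE B (Python) =====
-- def solve(A, B):
--     good = set(A.split('_'))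
--     scored = [(sum(1 for w in r.split('_') if w in good), i) for i, r in enumerate(B)]
--     scored.sort(key=lambda t: (t[0], len(scored) - t[1]), reverse=True)
--     return [t[1] for t in scored]
-- ===== Notes on version B (the rewrite author's own statement) =====
-- stated objective: simpler
-- what changed: The hand-built trie of Node objects (per-character insert and lookup walks) is replaced by a plain set of the good words with one membership test per review word; the scoring and the identical sort key are kept.
import Mathlib
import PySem

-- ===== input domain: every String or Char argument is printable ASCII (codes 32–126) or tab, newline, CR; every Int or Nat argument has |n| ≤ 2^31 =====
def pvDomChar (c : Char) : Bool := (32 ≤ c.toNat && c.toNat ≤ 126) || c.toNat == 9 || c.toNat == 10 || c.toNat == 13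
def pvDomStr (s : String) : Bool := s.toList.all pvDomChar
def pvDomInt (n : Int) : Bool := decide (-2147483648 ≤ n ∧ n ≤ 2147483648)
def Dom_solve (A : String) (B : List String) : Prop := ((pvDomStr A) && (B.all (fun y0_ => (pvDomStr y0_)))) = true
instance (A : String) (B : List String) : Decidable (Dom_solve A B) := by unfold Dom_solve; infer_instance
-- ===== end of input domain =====

-- B replaces A's hand-built trie with a plain set of the good words; one honest line:
-- B is simpler: a hash-set membership test per word instead of a per-character trie walk.

-- ===== PORT A =====
-- A's trie of Node objects cannot be a nested inductive here; since a trie node is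
-- uniquely named by its root path, the trie is ported EXACTLY as the pair
-- (nodes = set of paths of existing non-root nodes, words = set of paths with is_word).
-- 'char not in neighbours → create' becomes 'Set.add nodes (path ++ [c])' (same if-absent-insert),
-- and the lookup walk carries the (legal, path) state with the same early 'break'.

-- insert one word: walk chars, creating each missing node (path), return (nodes, final path)
def solveInsertWalk (nodes : PySem.Set (List Char)) (w : List Char) :
    PySem.Set (List Char) × List Char :=
  w.foldl (fun acc c =>
    let p := acc.2 ++ [c]
    (PySem.Set.add acc.1 p, p)) (nodes, [])

-- lookup walk: (legal_candidate, current path); break = stop updating once legal is false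
def solveLookWalk (nodes : PySem.Set (List Char)) (w : List Char) : Bool × List Char :=
  w.foldl (fun acc c =>
    if acc.1 then
      let p := acc.2 ++ [c]
      (nodes.contains p, p)
    else acc) (true, [])

def solve (A : String) (B : List String) : List Int :=
  let trie :=
    (PySem.Chars.splitOn A.toList ['_']).foldl
      (fun (tr : PySem.Set (List Char) × PySem.Set (List Char)) w =>
        let r := solveInsertWalk tr.1 w
        (r.1, PySem.Set.add tr.2 r.2))
      (PySem.Set.empty, PySem.Set.empty)
  let reviewsGoodness :=
    (PySem.List.enumerate B 0).foldl
      (fun (acc : List (Int × Int)) p =>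
        let score :=
          (PySem.Chars.splitOn p.2.toList ['_']).foldl
            (fun (s : Int) w =>
              let r := solveLookWalk trie.1 w
              if r.1 && trie.2.contains r.2 then s + 1 else s)
            0
        acc ++ [(score, p.1)])
      []
  let n : Int := reviewsGoodness.length
  (PySem.List.sorted2 reviewsGoodness (fun t => t.1) (fun t => n - t.2) true).map (·.2)

-- ===== PORT B =====
def solve_alt (A : String) (B : List String) : List Int :=
  let good : PySem.Set (List Char) := PySem.Set.ofList (PySem.Chars.splitOn A.toList ['_'])
  let scored : List (Int × Int) :=
    (PySem.List.enumerate B 0).map (fun p =>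
      (((PySem.Chars.splitOn p.2.toList ['_']).countP (fun w => good.contains w) : Int), p.1))
  let n : Int := scored.length
  (PySem.List.sorted2 scored (fun t => t.1) (fun t => n - t.2) true).map (·.2)

-- ===== PRECONDITION & SPEC =====
def Spec_solve (A : String) (B : List String) (out : List Int) : Prop := out = solve_alt A B
instance (A : String) (B : List String) (out : List Int) : Decidable (Spec_solve A B out) := by unfold Spec_solve; infer_instance

-- ===== CLAIM (what is proved, stated in full; the proofs are below) =====
def Claim_equal_solve : Prop := ∀ (A : String) (B : List String), Dom_solve A B → Spec_solve A B (solve A B)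

-- ===== LEMMAS AND PROOFS =====

-- the insert walk's final path is the whole word (appended to the start path)
theorem insertWalk_path (nodes : PySem.Set (List Char)) (w p : List Char) :
    (w.foldl (fun acc c => let q := acc.2 ++ [c]; (PySem.Set.add acc.1 q, q))
      (nodes, p)).2 = p ++ w := by
  induction w generalizing nodes p with
  | nil => simp
  | cons c t ih => simpa using ih (PySem.Set.add nodes (p ++ [c])) (p ++ [c])

-- membership is monotone along the insert walk
theorem insertWalk_mono (nodes : PySem.Set (List Char)) (w p x : List Char)
    (hx : x ∈ nodes) :
    x ∈ (w.foldl (fun acc c => let q := acc.2 ++ [c]; (PySem.Set.add acc.1 q, q))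
      (nodes, p)).1 := by
  induction w generalizing nodes p with
  | nil => simpa
  | cons c t ih =>
      simpa using ih (PySem.Set.add nodes (p ++ [c])) (p ++ [c])
        (by simp [PySem.Set.mem_add, hx])

-- after inserting w from path p, every path p ++ (w.take k), 1 ≤ k, is a node
theorem insertWalk_prefix (nodes : PySem.Set (List Char)) (w p : List Char)
    (k : Nat) (hk1 : 1 ≤ k) (hk : k ≤ w.length) :
    p ++ w.take k ∈
      (w.foldl (fun acc c => let q := acc.2 ++ [c]; (PySem.Set.add acc.1 q, q))
        (nodes, p)).1 := by
  induction w generalizing nodes p k with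
  | nil => simp at hk; omega
  | cons c t ih =>
      match k, hk1 with
      | 1, _ =>
          simpa using insertWalk_mono (PySem.Set.add nodes (p ++ [c])) t (p ++ [c])
            (p ++ [c]) (by simp [PySem.Set.mem_add])
      | (Nat.succ (Nat.succ m)), _ =>
          have := ih (PySem.Set.add nodes (p ++ [c])) (p ++ [c]) (m + 1)
            (by omega) (by simp at hk; omega)
          simpa [List.append_assoc] using this

-- the lookup walk, when it ends legal, has walked the whole word
theorem lookWalk_path (nodes : PySem.Set (List Char)) (w p : List Char) (b : Bool)
    (h : (w.foldl (fun acc c => if acc.1 then let q := acc.2 ++ [c]; (nodes.contains q, q) else acc)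
      (b, p)).1 = true) :
    (w.foldl (fun acc c => if acc.1 then let q := acc.2 ++ [c]; (nodes.contains q, q) else acc)
      (b, p)).2 = p ++ w ∧ b = true := by
  induction w generalizing b p with
  | nil => simpa using h
  | cons c t ih =>
      by_cases hb : b = true
      · subst hb
        have := ih (p ++ [c]) (nodes.contains (p ++ [c])) (by simpa using h)
        refine ⟨by simpa using this.1, rfl⟩
      · simp only [Bool.not_eq_true] at hb; subst hb
        have := ih p false (by simpa using h)
        exact absurd this.2 (by simp)

-- if every nonempty prefix of w (continuing p) is a node, the walk stays legal
theorem lookWalk_legal (nodes : PySem.Set (List Char)) (w p : List Char)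
    (h : ∀ k, 1 ≤ k → k ≤ w.length → p ++ w.take k ∈ nodes) :
    (w.foldl (fun acc c => if acc.1 then let q := acc.2 ++ [c]; (nodes.contains q, q) else acc)
      (true, p)) = (true, p ++ w) := by
  induction w generalizing p with
  | nil => simp
  | cons c t ih =>
      have h1 : p ++ [c] ∈ nodes := by simpa using h 1 (by omega) (by simp)
      have hc : nodes.contains (p ++ [c]) = true := by
        simpa [PySem.Set.contains] using h1
      have ht : ∀ k, 1 ≤ k → k ≤ t.length → (p ++ [c]) ++ t.take k ∈ nodes := by
        intro k hk1 hk
        have := h (k + 1) (by omega) (by simp; omega)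
        simpa [List.append_assoc] using this
      simp only [List.foldl_cons]
      rw [hc] at *
      simpa [List.append_assoc] using ih (p ++ [c]) ht

-- characterisation of the built trie
def trieStep (tr : PySem.Set (List Char) × PySem.Set (List Char)) (w : List Char) :
    PySem.Set (List Char) × PySem.Set (List Char) :=
  let r := solveInsertWalk tr.1 w
  (r.1, PySem.Set.add tr.2 r.2)

theorem trie_words (ws : List (List Char)) (tr : PySem.Set (List Char) × PySem.Set (List Char)) :
    (ws.foldl trieStep tr).2 = ws.foldl PySem.Set.add tr.2 := by
  induction ws generalizing tr with
  | nil => rfl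
  | cons w t ih =>
      rw [List.foldl_cons, List.foldl_cons, ih]
      simp [trieStep, solveInsertWalk, insertWalk_path tr.1 w []]

theorem trie_nodes_mono (ws : List (List Char)) (tr : PySem.Set (List Char) × PySem.Set (List Char))
    (x : List Char) (hx : x ∈ tr.1) : x ∈ (ws.foldl trieStep tr).1 := by
  induction ws generalizing tr with
  | nil => exact hx
  | cons w t ih =>
      exact ih _ (by simpa [trieStep, solveInsertWalk] using insertWalk_mono tr.1 w [] x hx)

theorem trie_nodes_prefix (ws : List (List Char)) (tr : PySem.Set (List Char) × PySem.Set (List Char))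
    (w : List Char) (k : Nat) (hk1 : 1 ≤ k) (hk : k ≤ w.length) :
    w ∈ ws → w.take k ∈ (ws.foldl trieStep tr).1 := by
  induction ws generalizing tr with
  | nil => intro hw; cases hw
  | cons v t ih =>
      intro hw
      rcases List.mem_cons.mp hw with hw | hw
      · subst hw
        refine trie_nodes_mono t _ _ ?_
        simpa [trieStep, solveInsertWalk] using insertWalk_prefix tr.1 w [] k hk1 hk
      · exact ih _ hw

-- the per-word goodness test: the trie lookup is membership in the set of good words
theorem perword (ws : List (List Char)) (w : List Char) :
    ((solveLookWalk (ws.foldl trieStep (PySem.Set.empty, PySem.Set.empty)).1 w).1 &&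
      (ws.foldl trieStep (PySem.Set.empty, PySem.Set.empty)).2.contains
        (solveLookWalk (ws.foldl trieStep (PySem.Set.empty, PySem.Set.empty)).1 w).2)
    = (PySem.Set.ofList ws).contains w := by
  have hw2 : (ws.foldl trieStep (PySem.Set.empty, PySem.Set.empty)).2 = PySem.Set.ofList ws := by
    rw [trie_words, PySem.Set.ofList_eq_foldl]; rfl
  by_cases hmem : w ∈ ws
  · have hleg : solveLookWalk (ws.foldl trieStep (PySem.Set.empty, PySem.Set.empty)).1 w = (true, w) := by
      have := lookWalk_legal (ws.foldl trieStep (PySem.Set.empty, PySem.Set.empty)).1 w []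
        (fun k hk1 hk => by
          simpa using trie_nodes_prefix ws (PySem.Set.empty, PySem.Set.empty) w k hk1 hk hmem)
      simpa [solveLookWalk] using this
    rw [hleg, hw2]
    simp
  · have h0 : (PySem.Set.ofList ws).contains w = false := by
      simpa [PySem.Set.contains] using fun h => hmem ((PySem.Set.mem_ofList ws w).mp h)
    rw [h0, hw2]
    rcases hb : (solveLookWalk (ws.foldl trieStep (PySem.Set.empty, PySem.Set.empty)).1 w).1 with _ | _
    · simp
    · have hp := lookWalk_path (ws.foldl trieStep (PySem.Set.empty, PySem.Set.empty)).1 w [] true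
        (by simpa [solveLookWalk] using hb)
      have : (solveLookWalk (ws.foldl trieStep (PySem.Set.empty, PySem.Set.empty)).1 w).2 = w := by
        simpa [solveLookWalk] using hp.1
      rw [this, h0]
      simp

-- proof-only abbreviations for the two score pipelines
def trieOf (A : String) : PySem.Set (List Char) × PySem.Set (List Char) :=
  (PySem.Chars.splitOn A.toList ['_']).foldl trieStep (PySem.Set.empty, PySem.Set.empty)

def scoreA (A : String) (r : List Char) : Int :=
  (PySem.Chars.splitOn r ['_']).foldl
    (fun (s : Int) w =>
      let rr := solveLookWalk (trieOf A).1 w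
      if rr.1 && (trieOf A).2.contains rr.2 then s + 1 else s) 0

def scoreB (A : String) (r : List Char) : Int :=
  ((PySem.Chars.splitOn r ['_']).countP
    (fun w => (PySem.Set.ofList (PySem.Chars.splitOn A.toList ['_'])).contains w) : Int)

def rgA (A : String) (B : List String) : List (Int × Int) :=
  (PySem.List.enumerate B 0).foldl (fun acc p => acc ++ [(scoreA A p.2.toList, p.1)]) []

def scB (A : String) (B : List String) : List (Int × Int) :=
  (PySem.List.enumerate B 0).map (fun p => (scoreB A p.2.toList, p.1))

theorem score_eq (A : String) (r : List Char) : scoreA A r = scoreB A r := by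
  unfold scoreA scoreB
  have hfun : (fun (s : Int) w =>
        let rr := solveLookWalk (trieOf A).1 w
        if rr.1 && (trieOf A).2.contains rr.2 then s + 1 else s)
      = (fun (s : Int) w =>
          if (PySem.Set.ofList (PySem.Chars.splitOn A.toList ['_'])).contains w then s + 1 else s) := by
    funext s w
    show (if ((solveLookWalk _ w).1 && _) = true then _ else _) = _
    unfold trieOf
    rw [perword (PySem.Chars.splitOn A.toList ['_']) w]
  rw [hfun, PySem.List.foldl_if_add_one]
  rw [zero_add]

theorem rg_eq (A : String) (B : List String) : rgA A B = scB A B := by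
  unfold rgA scB
  rw [PySem.List.foldl_append_singleton_eq_map
    (f := fun p : Int × String => (scoreA A p.2.toList, p.1))]
  rw [List.nil_append]
  exact List.map_congr_left (fun p _ => by rw [score_eq A p.2.toList])

theorem solve_eq_alt (A : String) (B : List String) : solve A B = solve_alt A B := by
  show (PySem.List.sorted2 (rgA A B) (fun t => t.1)
      (fun t => ((rgA A B).length : Int) - t.2) true).map (·.2)
    = (PySem.List.sorted2 (scB A B) (fun t => t.1)
      (fun t => ((scB A B).length : Int) - t.2) true).map (·.2)
  rw [rg_eq A B]

-- ===== VERDICT (by name: the statement is the Claim_ definition above) =====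
theorem solve_spec : Claim_equal_solve := by
  intro A B _
  exact (solve_eq_alt A B).symm ▸ rfl
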